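-- pv_equiv track=rewrite | github.com/RakhimovSE/Python-Lessons | 5. October 2018/31. 2018_10_23/source_2.py | f
-- ===== SOURCE A (Python) =====
-- fibo = [1, 2, 3, 5, 8, 13, 21, 34, 55, 89]
--
-- def f(word, n, last_fibo_idx, repeats):
--     if n == 0:
--         return [word]
--     result = []
--     for i in range(last_fibo_idx, -1, -1):
--         if n >= fibo[i] and repeats[i] > 0:
--             repeats[i] -= 1
--             result.extend(f(chr(ord('A') + i) + word, n - fibo[i], i, repeats))
--             repeats[i] += 1
--     return result
-- ===== SOURCE B (Python) =====
-- fibo = [1, 2, 3, 5, 8, 13, 21, 34, 55, 89]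
--
-- def f(word, n, last_fibo_idx, repeats):
--     # Count-vector enumeration: pick how many copies t of the highest letter to
--     # use (largest t first), then recurse on the lower letters only; `repeats`
--     # is never modified.
--     if n == 0:
--         return [word]
--     if last_fibo_idx < 0:
--         return []
--     i = last_fibo_idx
--     fl = fibo[i]
--     t_max = min(n // fl, max(repeats[i], 0)) if n >= fl else 0
--     letter = chr(ord('A') + i)
--     result = []
--     for t in range(t_max, -1, -1):
--         result += f(letter * t + word, n - t * fl, i - 1, repeats)
--     return result
-- ===== Notes on version B (the rewrite author's own statement) =====
-- stated objective: alternative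
-- what changed: B enumerates the multiplicity of each letter directly (t copies of the highest letter computed by integer division, largest t first) and recurses only on lower indices with an untouched repeats list, instead of A's one-letter-at-a-time recursion that re-visits the same index and mutates/restores repeats.
import Mathlib
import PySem

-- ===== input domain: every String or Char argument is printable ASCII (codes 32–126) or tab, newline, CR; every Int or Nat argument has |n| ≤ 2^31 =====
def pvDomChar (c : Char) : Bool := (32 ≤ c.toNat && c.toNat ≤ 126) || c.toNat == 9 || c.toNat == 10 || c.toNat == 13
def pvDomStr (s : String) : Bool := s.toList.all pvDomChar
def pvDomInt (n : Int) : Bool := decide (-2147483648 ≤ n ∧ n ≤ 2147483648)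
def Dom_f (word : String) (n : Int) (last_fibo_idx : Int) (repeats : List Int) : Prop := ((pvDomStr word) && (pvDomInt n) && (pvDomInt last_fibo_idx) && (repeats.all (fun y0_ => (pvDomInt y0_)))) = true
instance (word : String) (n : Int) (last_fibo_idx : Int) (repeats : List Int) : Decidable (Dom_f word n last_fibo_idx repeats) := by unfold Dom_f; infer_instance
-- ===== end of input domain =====

-- B replaces A's one-letter-at-a-time recursion (which mutates and then restores
-- `repeats`) by direct enumeration of each letter's multiplicity via integer division;
-- B never touches `repeats` (A restores it, so A's net effect on it is also none).

-- ===== PORT A =====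
-- the module constant `fibo`
def fiboL : List Int := [1, 2, 3, 5, 8, 13, 21, 34, 55, 89]

-- fibo[i]; the .getD default is reached only where Python raises IndexError (outside Pre_f)
def fgetA (i : Int) : Int := (PySem.List.pyGet? fiboL i).getD 1
-- repeats[i]; the default likewise is reached only where Python raises (outside Pre_f)
def rgetA (reps : List Int) (i : Int) : Int := (PySem.List.pyGet? reps i).getD 0

-- cited by the ports' termination proofs
theorem one_le_fgetA (i : Int) : 1 ≤ fgetA i := by
  unfold fgetA
  rcases h : PySem.List.pyGet? fiboL i with _ | v
  · simp
  · have hv : v ∈ fiboL := PySem.List.mem_of_pyGet?_eq_some _ h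
    simp only [Option.getD_some]
    simp only [fiboL, List.mem_cons, List.not_mem_nil, or_false] at hv
    rcases hv with h | h | h | h | h | h | h | h | h | h <;> omega

mutual
-- literal transliteration of A; `repeats[i] -= 1 … repeats[i] += 1` around the recursive
-- call is rendered by passing the decremented copy into the call and the original onwards
-- (the net effect of A's mutate-and-restore)
def f (word : String) (n : Int) (last_fibo_idx : Int) (repeats : List Int) : List String :=
  if n = 0 then [word]
  else fLoop word n repeats (PySem.List.pyRange last_fibo_idx (-1) (-1)) []
termination_by (n.toNat, 1, 0)

-- `for i in range(last_fibo_idx, -1, -1): if …: result.extend(f(…))`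
def fLoop (word : String) (n : Int) (repeats : List Int) (idxs : List Int) (result : List String) : List String :=
  match idxs with
  | [] => result
  | i :: rest =>
    if fgetA i ≤ n ∧ 0 < rgetA repeats i then
      fLoop word n repeats rest
        (result ++ f (String.ofList (Char.ofNat (65 + i.toNat) :: word.toList)) (n - fgetA i) i
          (repeats.set i.toNat (rgetA repeats i - 1)))
    else fLoop word n repeats rest result
termination_by (n.toNat, 0, idxs.length)
decreasing_by
  · rename_i h
    have h1 := one_le_fgetA i
    simp_wf
    exact Prod.Lex.left _ _ (by omega)
  · simp_wf
    exact Prod.Lex.right _ (Prod.Lex.right _ (by omega))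
  · simp_wf
    exact Prod.Lex.right _ (Prod.Lex.right _ (by omega))
end

-- ===== PORT B =====
def fgetB (i : Int) : Int := (PySem.List.pyGet? fiboL i).getD 1
def rgetB (reps : List Int) (i : Int) : Int := (PySem.List.pyGet? reps i).getD 0

mutual
-- Source B's body; the Int parameter last_fibo_idx is encoded as k = (last_fibo_idx+1).toNat,
-- so k = 0 is exactly Source B's `last_fibo_idx < 0` branch and k'+1 stands for index i = k'
def fAltGo (word : String) (n : Int) (k : Nat) (repeats : List Int) : List String :=
  if n = 0 then [word]
  else
    match k with
    | 0 => []
    | k' + 1 =>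
      let fl := fgetB (k' : Int)
      let tmax : Int :=
        if fl ≤ n then min (PySem.Int.floordiv n fl) (max (rgetB repeats (k' : Int)) 0) else 0
      fAltLoop word n k' repeats fl (PySem.List.pyRange tmax (-1) (-1)) []
termination_by (k, 0, 0)

-- `for t in range(t_max, -1, -1): result += f(letter * t + word, n - t*fl, i - 1, repeats)`
def fAltLoop (word : String) (n : Int) (k' : Nat) (repeats : List Int) (fl : Int)
    (ts : List Int) (result : List String) : List String :=
  match ts with
  | [] => result
  | t :: rest =>
      fAltLoop word n k' repeats fl rest
        (result ++ fAltGo (String.ofList (List.replicate t.toNat (Char.ofNat (65 + k')) ++ word.toList))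
          (n - t * fl) k' repeats)
termination_by (k', 1, ts.length)
end

def f_alt (word : String) (n : Int) (last_fibo_idx : Int) (repeats : List Int) : List String :=
  fAltGo word n ((last_fibo_idx + 1).toNat) repeats

-- ===== PRECONDITION & SPEC =====
-- Pre_f holds exactly where Python A returns: A raises IndexError iff n ≠ 0,
-- 0 ≤ last_fibo_idx, and either last_fibo_idx > 9 (fibo[i] out of range) or repeats is
-- shorter than last_fibo_idx+1 and some index ≥ len(repeats) is reached, i.e.
-- n ≥ fibo[len(repeats)].
def Pre_f (word : String) (n : Int) (last_fibo_idx : Int) (repeats : List Int) : Prop :=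
  n = 0 ∨ last_fibo_idx < 0 ∨
    (last_fibo_idx ≤ 9 ∧
      (last_fibo_idx < (repeats.length : Int) ∨ n < fiboL.getD repeats.length 0))
instance (word : String) (n : Int) (last_fibo_idx : Int) (repeats : List Int) : Decidable (Pre_f word n last_fibo_idx repeats) := by unfold Pre_f; infer_instance

def pvWitness_f : String × Int × Int × List Int := ("", 4, 3, [1, 1, 1, 1])

def Spec_f (word : String) (n : Int) (last_fibo_idx : Int) (repeats : List Int) (out : List String) : Prop := out = f_alt word n last_fibo_idx repeats
instance (word : String) (n : Int) (last_fibo_idx : Int) (repeats : List Int) (out : List String) : Decidable (Spec_f word n last_fibo_idx repeats out) := by unfold Spec_f; infer_instance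

-- ===== CLAIM (what is proved, stated in full; the proofs are below) =====
def Claim_equal_f : Prop := ∀ (word : String) (n : Int) (last_fibo_idx : Int) (repeats : List Int), Dom_f word n last_fibo_idx repeats → Pre_f word n last_fibo_idx repeats → Spec_f word n last_fibo_idx repeats (f word n last_fibo_idx repeats)

-- ===== LEMMAS AND PROOFS =====

theorem fgetB_eq_fgetA (i : Int) : fgetB i = fgetA i := rfl

theorem rgetB_eq_rgetA (reps : List Int) (i : Int) : rgetB reps i = rgetA reps i := rfl

-- fLoop's accumulator can be pulled out front
theorem fLoop_acc (word : String) (n : Int) (reps : List Int) (idxs : List Int)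
    (res : List String) :
    fLoop word n reps idxs res = res ++ fLoop word n reps idxs [] := by
  induction idxs generalizing res with
  | nil => simp [fLoop]
  | cons i rest ih =>
    by_cases hc : fgetA i ≤ n ∧ 0 < rgetA reps i
    · rw [fLoop, if_pos hc, fLoop, if_pos hc, ih, ih (([] : List String) ++ _)]
      simp
    · rw [fLoop, if_neg hc, fLoop, if_neg hc, ih]

-- fAltLoop is the flattened map of its loop body over the t-list
theorem fAltLoop_eq (word : String) (n : Int) (k' : Nat) (reps : List Int) (fl : Int)
    (ts : List Int) (res : List String) :
    fAltLoop word n k' reps fl ts res =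
      res ++ (ts.map (fun t =>
        fAltGo (String.ofList (List.replicate t.toNat (Char.ofNat (65 + k')) ++ word.toList))
          (n - t * fl) k' reps)).flatten := by
  induction ts generalizing res with
  | nil => simp [fAltLoop]
  | cons t rest ih =>
    rw [fAltLoop, ih]
    simp

theorem rget_set_lt (reps : List Int) (j : Nat) (v : Int) (i : Nat) (hij : i < j) :
    rgetB (reps.set j v) (i : Int) = rgetB reps (i : Int) := by
  unfold rgetB
  rw [PySem.List.pyGet?_natCast, PySem.List.pyGet?_natCast,
    List.getElem?_set_ne (by omega)]

theorem lt_length_of_rget_pos (reps : List Int) (k' : Nat) (h : 0 < rgetB reps (k' : Int)) :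
    k' < reps.length := by
  unfold rgetB at h
  rw [PySem.List.pyGet?_natCast] at h
  by_contra hh
  rw [List.getElem?_eq_none (by omega)] at h
  simp at h

theorem rget_set_self (reps : List Int) (k' : Nat) (v : Int) (h : k' < reps.length) :
    rgetB (reps.set k' v) (k' : Int) = v := by
  unfold rgetB
  rw [PySem.List.pyGet?_natCast]
  simp [h]

-- fAltGo at level k never reads repeats at positions ≥ k
theorem fAltGo_set_irrel (k : Nat) (word : String) (n : Int) (reps : List Int) (j : Nat)
    (v : Int) (hk : k ≤ j) :
    fAltGo word n k (reps.set j v) = fAltGo word n k reps := by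
  induction k generalizing word n with
  | zero => rw [fAltGo, fAltGo]
  | succ k' ih =>
    rw [fAltGo, fAltGo]
    by_cases h0 : n = 0
    · simp [h0]
    · rw [if_neg h0, if_neg h0]
      have hr : rgetB (reps.set j v) (k' : Int) = rgetB reps (k' : Int) :=
        rget_set_lt reps j v k' (by omega)
      dsimp only
      rw [hr, fAltLoop_eq, fAltLoop_eq]
      congr 1
      congr 1
      apply List.map_congr_left
      intro t _
      exact ih _ _ (by omega)

-- [a, a-1, …, 0] = (map (+1) [a-1, …, 0]) ++ [0]
theorem pyRange_desc_shift (a : Int) (ha : 0 ≤ a) :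
    PySem.List.pyRange a (-1) (-1) =
      ((PySem.List.pyRange (a - 1) (-1) (-1)).map (· + 1)) ++ [0] := by
  induction h : a.toNat generalizing a with
  | zero =>
    have h0 : a = 0 := by omega
    subst h0
    rw [PySem.List.pyRange_neg_one_cons (by norm_num),
      PySem.List.pyRange_neg_one_eq_nil (by norm_num)]
    norm_num
  | succ m ih =>
    have ha1 : (0 : Int) ≤ a - 1 := by omega
    rw [PySem.List.pyRange_neg_one_cons (show (-1 : Int) < a by omega),
      PySem.List.pyRange_neg_one_cons (show (-1 : Int) < a - 1 by omega),
      List.map_cons]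
    have := ih (a - 1) ha1 (by omega)
    rw [PySem.List.pyRange_neg_one_cons (show (-1 : Int) < a - 1 by omega)] at this
    simp only [List.cons_append]
    rw [← this]
    norm_num

theorem floordiv_sub_self (n fl : Int) (h : 0 < fl) :
    PySem.Int.floordiv (n - fl) fl = PySem.Int.floordiv n fl - 1 := by
  have h1 := (PySem.Int.floordiv_eq_iff_of_pos h).mp (rfl : PySem.Int.floordiv n fl = _)
  refine (PySem.Int.floordiv_eq_iff_of_pos h).mpr ⟨by nlinarith [h1.1, h1.2], by nlinarith [h1.1, h1.2]⟩

-- B satisfies A's one-step recurrence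
theorem fAltGo_step (k' : Nat) (word : String) (n : Int) (reps : List Int) (hn : n ≠ 0) :
    fAltGo word n (k' + 1) reps =
      (if fgetA (k' : Int) ≤ n ∧ 0 < rgetA reps (k' : Int) then
        fAltGo (String.ofList (Char.ofNat (65 + k') :: word.toList)) (n - fgetA (k' : Int))
          (k' + 1) (reps.set k' (rgetA reps (k' : Int) - 1))
      else []) ++ fAltGo word n k' reps := by
  have hfl : 1 ≤ fgetB (k' : Int) := by rw [fgetB_eq_fgetA]; exact one_le_fgetA _
  simp only [← fgetB_eq_fgetA, ← rgetB_eq_rgetA]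
  set i : Int := (k' : Int) with hi
  set fl : Int := fgetB i with hflv
  set c : Int := rgetB reps i with hcv
  set q : Int := PySem.Int.floordiv n fl with hqv
  rw [fAltGo, if_neg hn]
  dsimp only
  rw [fAltLoop_eq]
  by_cases hpick : fl ≤ n ∧ 0 < c
  · obtain ⟨hc, hcpos⟩ := hpick
    have hq1 : 1 ≤ q := by
      rw [hqv]
      exact (PySem.Int.le_floordiv_iff_mul_le (by omega)).mpr (by omega)
    have htmax : (if fl ≤ n then min q (max c 0) else 0) = min q c := by
      rw [if_pos hc]; omega
    rw [htmax, if_pos ⟨hc, hcpos⟩]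
    have hlen : k' < reps.length := lt_length_of_rget_pos reps k' hcpos
    have hc1 : rgetB (reps.set k' (c - 1)) i = c - 1 := rget_set_self reps k' _ hlen
    have htm1 : 1 ≤ min q c := by omega
    by_cases hz : n - fl = 0
    · -- n = fl: exactly one copy can be taken
      have hqe : q = 1 := by
        rw [hqv]
        exact (PySem.Int.floordiv_eq_iff_of_pos (by omega)).mpr ⟨by omega, by nlinarith⟩
      have hmin : min q c = 1 := by omega
      rw [hmin, PySem.List.pyRange_neg_one_cons (by norm_num),
        PySem.List.pyRange_neg_one_cons (by norm_num),
        PySem.List.pyRange_neg_one_eq_nil (by norm_num)]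
      conv_rhs => rw [fAltGo]
      rw [if_pos hz]
      simp only [List.map_cons, List.map_nil, List.flatten_cons, List.flatten_nil,
        List.append_nil, List.nil_append]
      rw [show n - (1 : Int) * fl = 0 by omega]
      rw [fAltGo.eq_def]
      norm_num [String.ofList_toList]
    · -- at least one copy taken and weight left over: regroup the remaining copies
      conv_rhs => rw [fAltGo]
      rw [if_neg hz]
      dsimp only
      rw [hc1, fAltLoop_eq]
      have htm' : (if fl ≤ n - fl then
          min (PySem.Int.floordiv (n - fl) fl) (max (c - 1) 0) else 0) = min q c - 1 := by
        by_cases h2 : fl ≤ n - fl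
        · rw [if_pos h2, floordiv_sub_self n fl (by omega), ← hqv]
          omega
        · rw [if_neg h2]
          have hqe : q = 1 := by
            rw [hqv]
            exact (PySem.Int.floordiv_eq_iff_of_pos (by omega)).mpr ⟨by omega, by nlinarith⟩
          omega
      rw [htm']
      rw [pyRange_desc_shift (min q c) (by omega)]
      simp only [List.map_append, List.map_map, List.flatten_append, List.map_cons,
        List.map_nil, List.flatten_cons, List.flatten_nil, List.nil_append, List.append_nil]
      have hpiece0 : fAltGo (String.ofList (List.replicate (0 : Int).toNat (Char.ofNat (65 + k')) ++ word.toList))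
          (n - 0 * fl) k' reps = fAltGo word n k' reps := by
        norm_num
      rw [hpiece0]
      congr 1
      congr 1
      apply List.map_congr_left
      intro t ht
      have ht0 : 0 ≤ t := by
        have := (PySem.List.mem_pyRange_neg_one).mp ht
        omega
      simp only [Function.comp]
      rw [fAltGo_set_irrel k' _ _ reps k' _ (le_refl k')]
      rw [String.toList_ofList]
      have hrep : List.replicate t.toNat (Char.ofNat (65 + k')) ++
          Char.ofNat (65 + k') :: word.toList =
          List.replicate (t + 1).toNat (Char.ofNat (65 + k')) ++ word.toList := by
        have h1 : (t + 1).toNat = t.toNat + 1 := by omega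
        rw [h1, List.replicate_succ', List.append_assoc, List.singleton_append]
      rw [hrep, show n - fl - t * fl = n - (t + 1) * fl by ring]
  · have htmax : (if fl ≤ n then min q (max c 0) else 0) = 0 := by
      by_cases h2 : fl ≤ n
      · have hq1 : 1 ≤ q := by
          rw [hqv]
          exact (PySem.Int.le_floordiv_iff_mul_le (by omega)).mpr (by omega)
        rw [if_pos h2]
        omega
      · rw [if_neg h2]
    rw [htmax, if_neg hpick, PySem.List.pyRange_neg_one_cons (by norm_num),
      PySem.List.pyRange_neg_one_eq_nil (by norm_num)]
    norm_num

theorem main_lemma (word : String) (n : Int) (last_fibo_idx : Int) (reps : List Int) :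
    f word n last_fibo_idx reps = fAltGo word n ((last_fibo_idx + 1).toNat) reps := by
  by_cases h0 : n = 0
  · rw [f, fAltGo.eq_def, if_pos h0, if_pos h0]
  · by_cases hl : last_fibo_idx < 0
    · have hk : (last_fibo_idx + 1).toNat = 0 := by omega
      rw [f, if_neg h0, PySem.List.pyRange_neg_one_eq_nil (by omega), fLoop, hk,
        fAltGo.eq_def]
      simp [h0]
    · have hk : (last_fibo_idx + 1).toNat = last_fibo_idx.toNat + 1 := by omega
      have hcast : (last_fibo_idx.toNat : Int) = last_fibo_idx := by omega
      rw [f, if_neg h0, hk,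
        PySem.List.pyRange_neg_one_cons (show (-1 : Int) < last_fibo_idx by omega), fLoop]
      by_cases hc : fgetA last_fibo_idx ≤ n ∧ 0 < rgetA reps last_fibo_idx
      · rw [if_pos hc, fLoop_acc]
        have htail : fLoop word n reps (PySem.List.pyRange (last_fibo_idx - 1) (-1) (-1)) [] =
            f word n (last_fibo_idx - 1) reps := by
          rw [f, if_neg h0]
        rw [htail, List.nil_append,
          main_lemma _ (n - fgetA last_fibo_idx) last_fibo_idx _,
          main_lemma word n (last_fibo_idx - 1) reps,
          fAltGo_step last_fibo_idx.toNat word n reps h0]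
        rw [hcast, if_pos hc]
        have hk2 : (last_fibo_idx - 1 + 1).toNat = last_fibo_idx.toNat := by omega
        rw [hk2, hk]
      · rw [if_neg hc, fLoop_acc, List.nil_append]
        have htail : fLoop word n reps (PySem.List.pyRange (last_fibo_idx - 1) (-1) (-1)) [] =
            f word n (last_fibo_idx - 1) reps := by
          rw [f, if_neg h0]
        rw [htail, main_lemma word n (last_fibo_idx - 1) reps,
          fAltGo_step last_fibo_idx.toNat word n reps h0]
        rw [hcast, if_neg hc]
        simp [show (last_fibo_idx - 1 + 1).toNat = last_fibo_idx.toNat by omega]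
termination_by ((last_fibo_idx + 1).toNat, n.toNat)
decreasing_by
  all_goals first
    | exact Prod.Lex.left _ _ (by omega)
    | exact Prod.Lex.right _ (by have h1 := one_le_fgetA last_fibo_idx; omega)

-- ===== VERDICT (by name: the statement is the Claim_ definition above) =====
theorem f_spec : Claim_equal_f := by
  intro word n last_fibo_idx repeats _ _
  unfold Spec_f f_alt
  exact main_lemma word n last_fibo_idx repeats
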